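-- pv_equiv track=rewrite | github.com/sheim/sot-core | src/dynamic_graph/sot/core/meta_task_6d.py | toFlags
-- ===== SOURCE A (Python) =====
-- def toFlags(arr):
--     """
--     Convert an array of boolean to a /flag/ format, type 001010110, in little indian
--     (reverse order, first bool of the list will be the [01] of extrem right).
--     """
--     l=max(arr)+1
--     lres=[0]*l
--     for i in arr:
--         lres[i]=1
--     lres.reverse()
--     res=''
--     for i in lres:
--         res+=str(i)
--     return res
-- ===== SOURCE B (Python) =====
-- def toFlags(arr):
--     """
--     Convert an array of boolean to a /flag/ format, type 001010110, in little indian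
--     (reverse order, first bool of the list will be the [01] of extrem right).
--     """
--     l = max(arr) + 1
--     n = 0
--     for i in arr:
--         n |= 1 << i
--     return format(n, '0{}b'.format(l))
-- ===== Notes on version B (the rewrite author's own statement) =====
-- stated objective: idiomatic
-- what changed: Replaces the index-assigned flag list, in-place reverse and string concatenation by an integer bitmask (n |= 1 << i) rendered once with format(n, '0lb'), whose MSB-first string is exactly A's reversed flag string.
-- outside the precondition, e.g. on toFlags([2, -2]): A returns '110', B raises ValueError; on toFlags([2, -1]): A returns '100', B raises ValueError
import Mathlib
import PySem

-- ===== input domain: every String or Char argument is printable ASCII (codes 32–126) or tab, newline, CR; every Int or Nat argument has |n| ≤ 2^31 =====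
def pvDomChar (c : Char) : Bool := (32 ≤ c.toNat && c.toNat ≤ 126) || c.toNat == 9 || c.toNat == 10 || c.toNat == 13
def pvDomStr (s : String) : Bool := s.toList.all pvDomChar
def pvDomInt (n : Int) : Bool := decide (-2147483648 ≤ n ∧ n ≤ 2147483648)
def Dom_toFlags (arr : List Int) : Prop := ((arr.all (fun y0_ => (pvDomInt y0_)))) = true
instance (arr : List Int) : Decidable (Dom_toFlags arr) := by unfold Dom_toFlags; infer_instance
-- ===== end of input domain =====

-- B replaces A's index-assigned flag list, in-place reverse and string concatenation by an
-- integer bitmask rendered once as a zero-padded binary string (idiomatic; same asymptotic cost).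

-- ===== PORT A =====
-- res += str(i) is accumulated on List Char (Lean's own String.append is kernel-opaque); exact.
def toFlags (arr : List Int) : String :=
  let l : Int := (PySem.List.max? arr (fun x => x)).getD 0 + 1  -- max(arr)+1; [] raises ValueError, excluded by Pre_
  let lres0 : List Int := List.replicate l.toNat 0              -- [0]*l  (Python gives [] for l ≤ 0, as does toNat)
  let lres1 : List Int := arr.foldl (fun L i => PySem.List.pySetD L i 1) lres0  -- lres[i]=1; IndexError excluded by Pre_
  let lres2 : List Int := lres1.reverse
  String.mk (lres2.foldl (fun res i => res ++ PySem.Int.toChars i) [])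

-- ===== PORT B =====
def toFlags_alt (arr : List Int) : String :=
  let l : Int := (PySem.List.max? arr (fun x => x)).getD 0 + 1  -- max(arr)+1; [] raises ValueError, excluded by Pre_
  let n : Int := arr.foldl (fun n i => PySem.Int.bor n ((1 : Int) <<< (i.toNat : Int))) 0  -- n |= 1 << i; i < 0 raises ValueError, excluded by Pre_
  let digits : List Char := PySem.Int.toBinChars n              -- format(n, 'b')
  String.mk (List.replicate (l.toNat - digits.length) '0' ++ digits)  -- zero-pad to width l, as format(n, '0{l}b')

-- ===== PRECONDITION & SPEC =====
-- Pre_ excludes the empty list (both versions raise ValueError in max()) and lists with a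
-- negative element: there A either raises IndexError or silently wraps the negative index
-- into the flag list, while B's `1 << i` raises ValueError.
def Pre_toFlags (arr : List Int) : Prop := arr ≠ [] ∧ ∀ i ∈ arr, 0 ≤ i
instance (arr : List Int) : Decidable (Pre_toFlags arr) := by unfold Pre_toFlags; infer_instance
def pvWitness_toFlags : List Int := [2, 0]
def Spec_toFlags (arr : List Int) (out : String) : Prop := out = toFlags_alt arr
instance (arr : List Int) (out : String) : Decidable (Spec_toFlags arr out) := by unfold Spec_toFlags; infer_instance

-- ===== CLAIM (what is proved, stated in full; the proofs are below) =====
def Claim_equal_toFlags : Prop := ∀ (arr : List Int), Dom_toFlags arr → Pre_toFlags arr → Spec_toFlags arr (toFlags arr)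

-- ===== LEMMAS AND PROOFS =====

-- the Nat bitmask that B's Int fold computes (proof-side view of B's loop)
def maskN (arr : List Int) : Nat := arr.foldl (fun m i => m ||| (1 <<< i.toNat)) 0

-- binary digits of a positive Nat, MSB first (proof-side view of Nat.toDigits 2)
def myBin (n : Nat) : List Char :=
  if _h : n < 2 then [Nat.digitChar n]
  else myBin (n / 2) ++ [Nat.digitChar (n % 2)]
  decreasing_by exact Nat.div_lt_self (by omega) (by omega)

theorem foldA_length (arr : List Int) (h : ∀ i ∈ arr, 0 ≤ i) :
    ∀ init : List Int, (arr.foldl (fun L i => PySem.List.pySetD L i 1) init).length = init.length := by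
  induction arr with
  | nil => intro init; rfl
  | cons i t ih =>
    intro init
    simp only [List.foldl_cons]
    rw [ih (fun j hj => h j (List.mem_cons_of_mem _ hj))]
    rw [PySem.List.pySetD_of_nonneg _ _ (h i (List.mem_cons_self ..))]
    simp

theorem foldA_getD (arr : List Int) (h : ∀ i ∈ arr, 0 ≤ i) :
    ∀ (init : List Int) (p : Nat), p < init.length →
      (arr.foldl (fun L i => PySem.List.pySetD L i 1) init).getD p 0
        = if (p : Int) ∈ arr then 1 else init.getD p 0 := by
  induction arr with
  | nil => intro init p hp; simp
  | cons i t ih =>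
    intro init p hp
    have hi : 0 ≤ i := h i (List.mem_cons_self ..)
    have ht : ∀ j ∈ t, 0 ≤ j := fun j hj => h j (List.mem_cons_of_mem _ hj)
    simp only [List.foldl_cons]
    rw [PySem.List.pySetD_of_nonneg _ _ hi]
    rw [ih ht (init.set i.toNat 1) p (by simpa using hp)]
    by_cases hpt : (p : Int) ∈ t
    · simp [hpt, List.mem_cons]
    · by_cases hpi : (p : Int) = i
      · have he : i.toNat = p := by omega
        have h2 : (init.set i.toNat 1).getD p 0 = 1 := by
          subst he
          simp [List.getD, hp]
        simp only [List.mem_cons, hpi, List.getD] at h2 ⊢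
        simp [h2]
      · have he : ¬ i.toNat = p := by omega
        simp [hpt, hpi, List.mem_cons, List.getD, he]

theorem maskN_cast (arr : List Int) :
    arr.foldl (fun n i => PySem.Int.bor n ((1 : Int) <<< (i.toNat : Int))) 0 = (maskN arr : Int) := by
  unfold maskN
  have key : ∀ acc : Nat, arr.foldl (fun n i => PySem.Int.bor n ((1 : Int) <<< (i.toNat : Int))) (acc : Int)
      = ((arr.foldl (fun m i => m ||| (1 <<< i.toNat)) acc : Nat) : Int) := by
    induction arr with
    | nil => intro acc; rfl
    | cons i t ih =>
      intro acc
      simp only [List.foldl_cons]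
      have h1 : (1 : Int) <<< ((i.toNat : Nat) : Int) = ((1 <<< i.toNat : Nat) : Int) := by
        exact_mod_cast Int.shiftLeft_natCast 1 i.toNat
      rw [h1, PySem.Int.bor_natCast, ih]
  simpa using key 0

theorem maskN_testBit_aux (arr : List Int) (h : ∀ i ∈ arr, 0 ≤ i) :
    ∀ (acc : Nat) (p : Nat),
      (arr.foldl (fun m i => m ||| (1 <<< i.toNat)) acc).testBit p
        = (acc.testBit p || decide ((p : Int) ∈ arr)) := by
  induction arr with
  | nil => intro acc p; simp
  | cons i t ih =>
    intro acc p
    have hi : 0 ≤ i := h i (List.mem_cons_self ..)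
    simp only [List.foldl_cons]
    rw [ih (fun j hj => h j (List.mem_cons_of_mem _ hj))]
    rw [Nat.testBit_or]
    have h1 : (1 <<< i.toNat).testBit p = decide ((p : Int) = i) := by
      rw [Nat.shiftLeft_eq, one_mul, Nat.testBit_two_pow]
      by_cases hpi : (p : Int) = i
      · have : i.toNat = p := by omega
        simp [this, hpi]
      · have : ¬ i.toNat = p := by omega
        simp [this, hpi]
    rw [h1]
    simp [List.mem_cons]
    rw [Bool.or_assoc]

theorem maskN_testBit (arr : List Int) (h : ∀ i ∈ arr, 0 ≤ i) (p : Nat) :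
    (maskN arr).testBit p = decide ((p : Int) ∈ arr) := by
  unfold maskN
  rw [maskN_testBit_aux arr h 0 p]
  simp

theorem maskN_lt (arr : List Int) (L : Nat) (hb : ∀ i ∈ arr, i < (L : Int)) (h : ∀ i ∈ arr, 0 ≤ i) :
    maskN arr < 2 ^ L := by
  unfold maskN
  have key : ∀ acc : Nat, acc < 2 ^ L → arr.foldl (fun m i => m ||| (1 <<< i.toNat)) acc < 2 ^ L := by
    induction arr with
    | nil => intro acc hacc; exact hacc
    | cons i t ih =>
      intro acc hacc
      simp only [List.foldl_cons]
      apply ih (fun j hj => hb j (List.mem_cons_of_mem _ hj)) (fun j hj => h j (List.mem_cons_of_mem _ hj))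
      apply Nat.or_lt_two_pow hacc
      rw [Nat.shiftLeft_eq, one_mul]
      have h1 := hb i (List.mem_cons_self ..)
      have h2 := h i (List.mem_cons_self ..)
      exact Nat.pow_lt_pow_right (by omega) (by omega)
  exact key 0 (by positivity)

theorem myBin_spec : ∀ (t m : Nat), 2 ^ t ≤ m → m < 2 ^ (t + 1) →
    myBin m = (List.range (t + 1)).reverse.map (fun j => if m.testBit j then '1' else '0') := by
  intro t
  induction t with
  | zero =>
    intro m h1 h2
    have : m = 1 := by omega
    subst this
    rw [myBin]
    decide
  | succ t ih =>
    intro m h1 h2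
    have hm2 : ¬ m < 2 := by
      have h3 : 2 ≤ 2 ^ (t + 1) := by
        have := Nat.one_le_two_pow (n := t)
        calc 2 = 2 * 1 := by omega
        _ ≤ 2 * 2 ^ t := by omega
        _ = 2 ^ (t + 1) := by ring
      omega
    rw [myBin, dif_neg hm2]
    have hd1 : 2 ^ t ≤ m / 2 := by omega
    have hd2 : m / 2 < 2 ^ (t + 1) := by omega
    rw [ih (m / 2) hd1 hd2]
    have hr : (List.range (t + 1 + 1)).reverse.map (fun j => if m.testBit j then '1' else '0')
        = ((List.range (t + 1)).reverse.map (fun j => if m.testBit (j + 1) then '1' else '0'))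
          ++ [if m.testBit 0 then '1' else '0'] := by
      conv_lhs => rw [List.range_succ_eq_map]
      simp [List.map_reverse, List.map_map, Function.comp_def]
    rw [hr]
    congr 1
    · apply List.map_congr_left
      intro j _
      rw [Nat.testBit_add_one]
    · rcases Nat.mod_two_eq_zero_or_one m with h | h
      · have : m.testBit 0 = false := by simp [Nat.testBit_zero, h]
        simp [this, h, Nat.digitChar]
      · have : m.testBit 0 = true := by simp [Nat.testBit_zero, h]
        simp [this, h, Nat.digitChar]

theorem toDigitsCore_eq_myBin : ∀ (f : Nat), ∀ (n : Nat) (acc : List Char), 0 < n → n < 2 ^ f →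
    Nat.toDigitsCore 2 f n acc = myBin n ++ acc := by
  intro f
  induction f with
  | zero => intro n acc h1 h2; omega
  | succ f ih =>
    intro n acc h1 h2
    by_cases hn : n < 2
    · have hn1 : n = 1 := by omega
      subst hn1
      rw [myBin]
      simp [Nat.toDigitsCore]
    · have hdiv : ¬ n / 2 = 0 := by omega
      rw [Nat.toDigitsCore]
      simp only [hdiv, if_false]
      rw [ih (n / 2) (Nat.digitChar (n % 2) :: acc) (by omega) (by omega)]
      conv_rhs => rw [myBin]
      rw [dif_neg hn]
      simp

theorem toFlags_spec : Claim_equal_toFlags := by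
  intro arr _hdom hpre
  obtain ⟨hne, hnn⟩ := hpre
  unfold Spec_toFlags toFlags toFlags_alt
  -- max(arr) = some M
  obtain ⟨M, hmax⟩ : ∃ M, PySem.List.max? arr (fun x => x) = some M := by
    cases h : PySem.List.max? arr (fun x => x) with
    | none => exact absurd ((PySem.List.max?_eq_none_iff arr (fun x => x)).mp h) hne
    | some M => exact ⟨M, rfl⟩
  have hMmem : M ∈ arr := PySem.List.max?_mem hmax
  have hMmax : ∀ y ∈ arr, y ≤ M := fun y hy => PySem.List.max?_isMax hmax y hy
  have hM0 : 0 ≤ M := hnn M hMmem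
  set L : Nat := M.toNat + 1 with hL
  have hlt : (M + 1).toNat = L := by omega
  rw [hmax]
  simp only [Option.getD_some, hlt]
  -- the common canonical string
  have hcast : ((M.toNat : Nat) : Int) = M := by omega
  -- A side
  have hUlen : (arr.foldl (fun Lst i => PySem.List.pySetD Lst i 1) (List.replicate L (0:Int))).length = L := by
    rw [foldA_length arr hnn]; simp
  have hU : arr.foldl (fun Lst i => PySem.List.pySetD Lst i 1) (List.replicate L (0:Int))
      = (List.range L).map (fun p : Nat => if (↑p : Int) ∈ arr then (1 : Int) else 0) := by
    apply List.ext_getElem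
    · simp [hUlen]
    · intro p hp1 hp2
      have hpL : p < L := by rw [hUlen] at hp1; exact hp1
      rw [← List.getD_eq_getElem _ 0 hp1]
      rw [foldA_getD arr hnn (List.replicate L (0:Int)) p (by simpa using hpL)]
      simp [hpL]
  have hA : (arr.foldl (fun Lst i => PySem.List.pySetD Lst i 1) (List.replicate L (0:Int))).reverse.foldl
        (fun res i => res ++ PySem.Int.toChars i) []
      = (List.range L).reverse.map (fun p : Nat => if (↑p : Int) ∈ arr then '1' else '0') := by
    rw [← List.flatMap_eq_foldl, hU, ← List.map_reverse, List.flatMap_map]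
    rw [List.map_eq_flatMap]
    congr 1
    funext p
    by_cases hp : (p : Int) ∈ arr <;> simp [hp] <;> rfl
  -- B side
  have hbits := maskN_testBit arr hnn
  have hup : maskN arr < 2 ^ L := by
    apply maskN_lt arr L _ hnn
    intro i hi
    have := hMmax i hi
    omega
  have hbitM : (maskN arr).testBit M.toNat = true := by
    rw [hbits M.toNat]
    simp [hcast, hMmem]
  have hlow : 2 ^ M.toNat ≤ maskN arr := by
    by_contra hc
    push Not at hc
    rw [Nat.testBit_lt_two_pow hc] at hbitM
    exact Bool.noConfusion hbitM
  have hpos : 0 < maskN arr := by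
    have := Nat.one_le_two_pow (n := M.toNat)
    omega
  have hdig : PySem.Int.toBinChars ((maskN arr : Nat) : Int) = myBin (maskN arr) := by
    simp only [PySem.Int.toBinChars]
    rw [if_neg (by omega), Int.toNat_natCast]
    rw [Nat.toDigits]
    rw [toDigitsCore_eq_myBin (maskN arr + 1) (maskN arr) [] hpos
      (lt_of_lt_of_le (Nat.lt_two_pow_self) (Nat.pow_le_pow_right (by omega) (by omega)))]
    simp
  have hmyb : myBin (maskN arr)
      = (List.range L).reverse.map (fun p : Nat => if (↑p : Int) ∈ arr then '1' else '0') := by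
    rw [myBin_spec M.toNat (maskN arr) hlow (by simpa [hL] using hup)]
    rw [show M.toNat + 1 = L from rfl]
    congr 1
    funext j
    rw [hbits j]
    by_cases hj : (j : Int) ∈ arr <;> simp [hj]
  rw [hA, maskN_cast arr, hdig, hmyb]
  simp
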